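-- pv_equiv track=rewrite | github.com/zoelsner/farmtopeople | server/services/meal_generator.py | find_product_by_name
-- ===== SOURCE A (Python) =====
-- from typing import Dict, Any, List, Optional
--
-- def find_product_by_name(catalog: Dict, search_name: str) -> Optional[Dict]:
--     """
--     Find a product in the catalog by partial name match.
--
--     Args:
--         catalog: Product catalog dictionary
--         search_name: Name to search for
--
--     Returns:
--         Product dict if found, None otherwise
--     """
--     search_lower = search_name.lower()
--
--     # Try exact match first
--     for name, product in catalog.items():
--         if search_lower == name.lower():
--             return product
--
--     # Try partial match
--     for name, product in catalog.items():
--         if search_lower in name.lower() or any(word in name.lower() for word in search_lower.split()):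
--             return product
--
--     return None
-- ===== SOURCE B (Python) =====
-- def find_product_by_name(catalog, search_name):
--     """Single pass: return immediately on a case-insensitive exact match,
--     otherwise remember the first partial match and return it at the end."""
--     search_lower = search_name.lower()
--     words = search_lower.split()
--     candidate = None
--     for name, product in catalog.items():
--         name_lower = name.lower()
--         if search_lower == name_lower:
--             return product
--         if candidate is None and (search_lower in name_lower
--                                   or any(w in name_lower for w in words)):
--             candidate = product
--     return candidate
-- ===== Notes on version B (the rewrite author's own statement) =====
-- stated objective: faster
-- what changed: Two separate scans over the catalog (exact pass, then partial pass) are fused into one pass that returns on an exact match and records the first partial candidate, lowering each name once instead of up to three times.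
import Mathlib
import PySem

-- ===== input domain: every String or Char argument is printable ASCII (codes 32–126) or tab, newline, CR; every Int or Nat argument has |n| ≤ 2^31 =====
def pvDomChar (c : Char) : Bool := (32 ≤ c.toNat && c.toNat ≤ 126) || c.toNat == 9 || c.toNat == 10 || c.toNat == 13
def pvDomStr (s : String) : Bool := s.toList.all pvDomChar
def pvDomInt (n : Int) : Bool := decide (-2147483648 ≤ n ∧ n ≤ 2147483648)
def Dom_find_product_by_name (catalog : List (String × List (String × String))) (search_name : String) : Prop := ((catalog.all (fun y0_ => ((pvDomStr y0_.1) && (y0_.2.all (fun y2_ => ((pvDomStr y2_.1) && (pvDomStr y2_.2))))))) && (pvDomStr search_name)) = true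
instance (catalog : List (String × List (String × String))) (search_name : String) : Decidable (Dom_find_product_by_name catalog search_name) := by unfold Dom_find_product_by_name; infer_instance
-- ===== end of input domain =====

-- B fuses A's two catalog scans (exact pass, then partial pass) into one pass that
-- returns on an exact match and records the first partial candidate (objective: faster, constant-factor).


-- ===== PORT A =====
-- the partial-match test of A's second loop: search_lower in name.lower() or any(word in name.lower() for word in search_lower.split())
def fpnPartialCond (searchLower : List Char) (name : String) : Bool :=
  PySem.Chars.isIn searchLower (PySem.Chars.lower name.toList) ||
    (PySem.Chars.split₀ searchLower).any (fun w => PySem.Chars.isIn w (PySem.Chars.lower name.toList))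

-- A's first loop: return the product of the first exact (case-insensitive) name match
def fpnExactLoop (searchLower : List Char) : List (String × List (String × String)) → Option (List (String × String))
  | [] => none
  | (name, product) :: rest =>
    if searchLower = PySem.Chars.lower name.toList then some product
    else fpnExactLoop searchLower rest

-- A's second loop: return the product of the first partial match
def fpnPartialLoop (searchLower : List Char) : List (String × List (String × String)) → Option (List (String × String))
  | [] => none
  | (name, product) :: rest =>
    if fpnPartialCond searchLower name then some product
    else fpnPartialLoop searchLower rest

def find_product_by_name (catalog : List (String × List (String × String))) (search_name : String) : Option (List (String × String)) :=
  let searchLower := PySem.Chars.lower search_name.toList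
  match fpnExactLoop searchLower catalog with
  | some p => some p
  | none => fpnPartialLoop searchLower catalog

-- ===== PORT B =====
-- B's single loop: return at once on an exact match, record the first partial candidate
def fpnAltLoop (searchLower : List Char) : List (String × List (String × String)) → Option (List (String × String)) → Option (List (String × String))
  | [], cand => cand
  | (name, product) :: rest, cand =>
    let nameLower := PySem.Chars.lower name.toList
    if searchLower = nameLower then some product
    else
      let cand' :=
        if cand.isNone &&
            (PySem.Chars.isIn searchLower nameLower ||
              (PySem.Chars.split₀ searchLower).any (fun w => PySem.Chars.isIn w nameLower)) then
          some product
        else cand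
      fpnAltLoop searchLower rest cand'

def find_product_by_name_alt (catalog : List (String × List (String × String))) (search_name : String) : Option (List (String × String)) :=
  fpnAltLoop (PySem.Chars.lower search_name.toList) catalog none

-- ===== PRECONDITION & SPEC =====
def Spec_find_product_by_name (catalog : List (String × List (String × String))) (search_name : String) (out : Option (List (String × String))) : Prop := out = find_product_by_name_alt catalog search_name
instance (catalog : List (String × List (String × String))) (search_name : String) (out : Option (List (String × String))) : Decidable (Spec_find_product_by_name catalog search_name out) := by unfold Spec_find_product_by_name; infer_instance

-- ===== CLAIM (what is proved, stated in full; the proofs are below) =====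
def Claim_equal_find_product_by_name : Prop := ∀ (catalog : List (String × List (String × String))) (search_name : String), Dom_find_product_by_name catalog search_name → Spec_find_product_by_name catalog search_name (find_product_by_name catalog search_name)

-- ===== LEMMAS AND PROOFS =====
-- loop invariant: B's fused loop equals A's exact loop, falling back to the recorded
-- candidate, falling back to A's partial loop
lemma fpnAltLoop_eq (sl : List Char) (l : List (String × List (String × String))) :
    ∀ cand : Option (List (String × String)),
      fpnAltLoop sl l cand =
        match fpnExactLoop sl l with
        | some p => some p
        | none => match cand with
                  | some c => some c
                  | none => fpnPartialLoop sl l := by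
  induction l with
  | nil => intro cand; cases cand <;> simp [fpnAltLoop, fpnExactLoop, fpnPartialLoop]
  | cons hd rest ih =>
    intro cand
    obtain ⟨name, product⟩ := hd
    by_cases hex : sl = PySem.Chars.lower name.toList
    · simp [fpnAltLoop, fpnExactLoop, hex]
    · rw [show fpnAltLoop sl ((name, product) :: rest) cand =
          fpnAltLoop sl rest
            (if cand.isNone &&
                (PySem.Chars.isIn sl (PySem.Chars.lower name.toList) ||
                  (PySem.Chars.split₀ sl).any
                    (fun w => PySem.Chars.isIn w (PySem.Chars.lower name.toList))) then
              some product
            else cand) from by simp [fpnAltLoop, hex]]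
      rw [ih]
      cases hrest : fpnExactLoop sl rest with
      | some p => simp [fpnExactLoop, hex, hrest]
      | none =>
        cases cand with
        | some c => simp [fpnExactLoop, hex, hrest]
        | none =>
          simp only [Option.isNone_none, Bool.true_and]
          rw [show (PySem.Chars.isIn sl (PySem.Chars.lower name.toList) ||
              (PySem.Chars.split₀ sl).any
                (fun w => PySem.Chars.isIn w (PySem.Chars.lower name.toList))) = fpnPartialCond sl name from rfl]
          cases hpc : fpnPartialCond sl name <;>
            simp [fpnExactLoop, fpnPartialLoop, hex, hrest, hpc]

-- ===== VERDICT (by name: the statement is the Claim_ definition above) =====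
theorem find_product_by_name_spec : Claim_equal_find_product_by_name := by
  intro catalog search_name _
  unfold Spec_find_product_by_name find_product_by_name find_product_by_name_alt
  rw [fpnAltLoop_eq]
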